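-- pv_equiv track=rewrite | github.com/tengxiaoliu/XoT | src/utils.py | sort_words_by_first_appearance
-- ===== SOURCE A (Python) =====
-- def sort_words_by_first_appearance(words, string):
--     word_index = {}  # Store the first appearance index of each word
--
--     for word in words:
--         index = string.find(word)
--         if index != -1:  # Word found in the string
--             word_index[word] = index
--
--     sorted_words = sorted(words, key=lambda x: word_index.get(x, float('inf')))
--     return sorted_words
-- ===== SOURCE B (Python) =====
-- def sort_words_by_first_appearance(words, string):
--     # Bucket the words by their first-appearance index, then emit the buckets
--     # in increasing index order; words not occurring in the string go last.
--     buckets = {}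
--     missing = []
--     for w in words:
--         i = string.find(w)
--         if i == -1:
--             missing.append(w)
--         else:
--             buckets.setdefault(i, []).append(w)
--     result = []
--     for i in sorted(buckets):
--         result.extend(buckets[i])
--     return result + missing
-- ===== Notes on version B (the rewrite author's own statement) =====
-- stated objective: alternative
-- what changed: Instead of decorating every word with its find-index and running a comparison-based stable sort over the words, B groups the words into per-index buckets in one pass (dict of lists plus a missing-list) and concatenates the buckets in increasing index order, so only the distinct indices are ever sorted.
import Mathlib
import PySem

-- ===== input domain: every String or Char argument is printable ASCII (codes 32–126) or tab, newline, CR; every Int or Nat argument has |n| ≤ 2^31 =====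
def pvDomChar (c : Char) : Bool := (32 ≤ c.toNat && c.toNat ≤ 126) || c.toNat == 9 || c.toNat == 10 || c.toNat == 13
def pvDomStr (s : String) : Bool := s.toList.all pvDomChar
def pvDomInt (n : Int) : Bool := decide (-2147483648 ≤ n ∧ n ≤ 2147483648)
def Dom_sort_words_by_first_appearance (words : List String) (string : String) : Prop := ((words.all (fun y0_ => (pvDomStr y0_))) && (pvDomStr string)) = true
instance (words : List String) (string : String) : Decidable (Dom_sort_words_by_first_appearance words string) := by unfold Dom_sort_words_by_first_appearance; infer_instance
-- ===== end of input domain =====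

-- B buckets the words by first-appearance index and emits the buckets in increasing
-- index order (absent words last), replacing A's key-decorated stable sort; objective: alternative.

-- ===== PORT A =====
def sort_words_by_first_appearance (words : List String) (string : String) : List String :=
  let word_index : PySem.Dict String Int :=
    words.foldl (fun d word =>
      let index := PySem.Str.find string word
      if index ≠ -1 then d.insert word index else d) PySem.Dict.empty
  -- key = word_index.get(x, float('inf')): a missing word gets +infinity, modelled as ⊤ in
  -- WithTop Int (WithTop.decidableLT is pinned because the inferred order instance is noncomputable)
  @PySem.List.sorted String (WithTop Int) _ WithTop.decidableLT words (fun x =>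
    match word_index.get? x with
    | some i => (i : WithTop Int)
    | none => (⊤ : WithTop Int)) false

-- ===== PORT B =====
def sort_words_by_first_appearance_alt (words : List String) (string : String) : List String :=
  let st : PySem.Dict Int (List String) × List String :=
    words.foldl (fun st w =>
      let i := PySem.Str.find string w
      if i = -1 then (st.1, st.2 ++ [w])
      else (st.1.modify i [] (fun b => b ++ [w]), st.2)) (PySem.Dict.empty, [])
  let result := (PySem.List.sorted st.1.keys (fun x => x) false).foldl
      (fun acc i => acc ++ st.1.getD i []) []
  result ++ st.2

-- ===== PRECONDITION & SPEC =====
def Spec_sort_words_by_first_appearance (words : List String) (string : String) (out : List String) : Prop := out = sort_words_by_first_appearance_alt words string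
instance (words : List String) (string : String) (out : List String) : Decidable (Spec_sort_words_by_first_appearance words string out) := by unfold Spec_sort_words_by_first_appearance; infer_instance

-- ===== CLAIM (what is proved, stated in full; the proofs are below) =====
def Claim_equal_sort_words_by_first_appearance : Prop := ∀ (words : List String) (string : String), Dom_sort_words_by_first_appearance words string → Spec_sort_words_by_first_appearance words string (sort_words_by_first_appearance words string)

-- ===== LEMMAS AND PROOFS =====

-- The comparison key both programs implicitly sort by: first-appearance index,
-- with ⊤ (Python's float('inf')) for words that do not occur.
def pvKey (f : String → Int) (w : String) : WithTop Int :=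
  if f w = -1 then (⊤ : WithTop Int) else ((f w : Int) : WithTop Int)

-- A's dict after the loop: lookup of x is its find-index iff x ∈ ws and x occurs.
lemma dict_get (f : String → Int) (ws : List String) (d : PySem.Dict String Int) (x : String) :
    (ws.foldl (fun d w => if f w ≠ -1 then d.insert w (f w) else d) d).get? x
      = if x ∈ ws ∧ f x ≠ -1 then some (f x) else d.get? x := by
  induction ws generalizing d with
  | nil => simp
  | cons w ws ih =>
    simp only [List.foldl_cons, ih, List.mem_cons]
    by_cases hfw : f w = -1
    · have hxw : ¬ ((x = w ∨ x ∈ ws) ∧ f x ≠ -1) ↔ ¬ (x ∈ ws ∧ f x ≠ -1) ∨ (x = w ∧ f x = -1) := by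
        constructor
        · intro h
          by_cases hx : x ∈ ws ∧ f x ≠ -1
          · exact absurd ⟨Or.inr hx.1, hx.2⟩ h
          · exact Or.inl hx
        · rintro (h | ⟨rfl, h2⟩) ⟨h3, h4⟩
          · rcases h3 with rfl | h5
            · rw [← hfw] at h4; exact h4 rfl
            · exact h ⟨h5, h4⟩
          · exact h4 h2
      simp only [hfw]
      by_cases hc : (x = w ∨ x ∈ ws) ∧ f x ≠ -1
      · rcases hc.1 with rfl | h5
        · exact absurd hfw hc.2
        · simp [hc, h5]
      · rcases (hxw.mp hc) with h | ⟨rfl, h2⟩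
        · simp [hc, h]
        · simp [h2]
    · simp only [hfw, ne_eq, not_false_iff, if_true, PySem.Dict.get?_insert]
      by_cases hxw : x = w
      · subst hxw
        simp [hfw]
      · simp only [if_neg hxw]
        have : ((x = w ∨ x ∈ ws) ∧ f x ≠ -1) ↔ (x ∈ ws ∧ f x ≠ -1) := by
          constructor
          · rintro ⟨rfl | h2, h3⟩
            · exact absurd rfl hxw
            · exact ⟨h2, h3⟩
          · rintro ⟨h2, h3⟩; exact ⟨Or.inr h2, h3⟩
        rw [if_congr this rfl rfl]

-- insertBy only looks at comparisons of x against members of ys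
lemma insertBy_congr {α : Type} (b1 b2 : α → α → Bool) (x : α) (ys : List α)
    (h : ∀ y ∈ ys, b1 x y = b2 x y) :
    PySem.List.insertBy b1 x ys = PySem.List.insertBy b2 x ys := by
  induction ys with
  | nil => rfl
  | cons y ys ih =>
    simp only [PySem.List.insertBy]
    rw [h y (by simp)]
    by_cases hb : b2 x y
    · simp [hb]
    · simp only [hb, Bool.false_eq_true, if_false]
      rw [ih (fun z hz => h z (by simp [hz]))]

-- sorted only looks at key values of the list's members
lemma sorted_congr {α κ : Type} [LT κ] [DecidableLT κ] (xs : List α) (k1 k2 : α → κ)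
    (h : ∀ x ∈ xs, k1 x = k2 x) :
    PySem.List.sorted xs k1 false = PySem.List.sorted xs k2 false := by
  rw [PySem.List.sorted_eq_foldl_insertBy, PySem.List.sorted_eq_foldl_insertBy]
  have aux : ∀ (l : List α) (acc : List α), (∀ x ∈ l, k1 x = k2 x) → (∀ a ∈ acc, k1 a = k2 a) →
      l.foldl (fun acc x => PySem.List.insertBy (fun a b => decide (k1 a < k1 b)) x acc) acc
        = l.foldl (fun acc x => PySem.List.insertBy (fun a b => decide (k2 a < k2 b)) x acc) acc := by
    intro l
    induction l with
    | nil => intro acc _ _; rfl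
    | cons x l ih =>
      intro acc hl hacc
      simp only [List.foldl_cons]
      rw [insertBy_congr _ (fun a b => decide (k2 a < k2 b)) x acc
        (fun y hy => by rw [hl x (by simp), hacc y hy])]
      exact ih _ (fun z hz => hl z (by simp [hz]))
        (fun a ha => by
          rcases (PySem.List.mem_insertBy _ x a acc).mp ha with h1 | h2
          · subst h1; exact hl a (by simp)
          · exact hacc a h2)
  exact aux xs [] h (by simp)

-- inserting between a lower and an upper part
lemma insertBy_middle {α : Type} (b : α → α → Bool) (x : α) (L R : List α)
    (hL : ∀ y ∈ L, b x y = false) (hR : ∀ y ∈ R, b x y = true) :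
    PySem.List.insertBy b x (L ++ R) = L ++ x :: R := by
  induction L with
  | nil =>
    cases R with
    | nil => rfl
    | cons y R => simp [PySem.List.insertBy, hR y (by simp)]
  | cons y L ih =>
    simp only [List.cons_append, PySem.List.insertBy, hL y (by simp), Bool.false_eq_true,
      if_false]
    rw [ih (fun z hz => hL z (by simp [hz]))]

-- the two goal-shaped corollaries used in the induction step of `core`
lemma insertBy_step4 {α : Type} (b : α → α → Bool) (x : α) (A1 A2 A3 A4 : List α)
    (h1 : ∀ y ∈ A1, b x y = false) (h2 : ∀ y ∈ A2, b x y = false)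
    (h3 : ∀ y ∈ A3, b x y = true) (h4 : ∀ y ∈ A4, b x y = true) :
    PySem.List.insertBy b x (A1 ++ (A2 ++ (A3 ++ A4))) = A1 ++ (A2 ++ (x :: (A3 ++ A4))) := by
  have := insertBy_middle b x (A1 ++ A2) (A3 ++ A4)
    (by intro y hy; rcases List.mem_append.mp hy with h | h; exacts [h1 y h, h2 y h])
    (by intro y hy; rcases List.mem_append.mp hy with h | h; exacts [h3 y h, h4 y h])
  simpa using this

lemma insertBy_step3 {α : Type} (b : α → α → Bool) (x : α) (A1 A3 A4 : List α)
    (h1 : ∀ y ∈ A1, b x y = false)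
    (h3 : ∀ y ∈ A3, b x y = true) (h4 : ∀ y ∈ A4, b x y = true) :
    PySem.List.insertBy b x (A1 ++ (A3 ++ A4)) = A1 ++ (x :: (A3 ++ A4)) := by
  have := insertBy_middle b x A1 (A3 ++ A4) h1
    (by intro y hy; rcases List.mem_append.mp hy with h | h; exacts [h3 y h, h4 y h])
  simpa using this

-- a strictly increasing list splits around any of its members
lemma strict_split (S : List Int) (i : Int) (hs : S.Pairwise (· < ·)) (hi : i ∈ S) :
    ∃ L R, S = L ++ i :: R ∧ (∀ j ∈ L, j < i) ∧ (∀ j ∈ R, i < j) := by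
  induction S with
  | nil => simp at hi
  | cons j S ih =>
    rcases List.mem_cons.mp hi with h1 | h2
    · subst h1
      exact ⟨[], S, rfl, by simp, fun k hk => (List.pairwise_cons.mp hs).1 k hk⟩
    · obtain ⟨L, R, hS, hL, hR⟩ := ih (List.pairwise_cons.mp hs).2 h2
      refine ⟨j :: L, R, by rw [hS]; rfl, ?_, hR⟩
      intro k hk
      rcases List.mem_cons.mp hk with h3 | h4
      · subst h3; exact (List.pairwise_cons.mp hs).1 i h2
      · exact hL k h4

-- inserting a fresh element into a strictly increasing list
lemma insert_strict (b : Int → Int → Bool) (hb : ∀ a c : Int, b a c = true ↔ a < c)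
    (S : List Int) (i : Int) (hs : S.Pairwise (· < ·)) (hi : i ∉ S) :
    ∃ L R, S = L ++ R ∧
      PySem.List.insertBy b i S = L ++ i :: R ∧
      (∀ j ∈ L, j < i) ∧ (∀ j ∈ R, i < j) := by
  induction S with
  | nil => exact ⟨[], [], rfl, rfl, by simp, by simp⟩
  | cons j S ih =>
    have hmem : i ≠ j ∧ i ∉ S := by simpa [List.mem_cons, not_or] using hi
    by_cases hij : i < j
    · refine ⟨[], j :: S, rfl, ?_, by simp, ?_⟩
      · simp [PySem.List.insertBy, (hb i j).mpr hij]
      · intro k hk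
        rcases List.mem_cons.mp hk with h1 | h2
        · subst h1; exact hij
        · exact lt_trans hij ((List.pairwise_cons.mp hs).1 k h2)
    · have hji : j < i := by
        rcases lt_trichotomy i j with h | h | h
        · exact absurd h hij
        · exact absurd h hmem.1
        · exact h
      obtain ⟨L, R, hS, hins, hL, hR⟩ := ih (List.pairwise_cons.mp hs).2 hmem.2
      refine ⟨j :: L, R, by rw [hS]; rfl, ?_, ?_, hR⟩
      · have hbij : b i j = false := by
          rw [← Bool.not_eq_true, hb]; exact hij
        simp only [PySem.List.insertBy, hbij, Bool.false_eq_true, if_false]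
        rw [hins]; rfl
      · intro k hk
        rcases List.mem_cons.mp hk with h1 | h2
        · subst h1; exact hji
        · exact hL k h2

-- sorted of a list with one more element at the end = insert into sorted of the list
lemma sorted_append_singleton {α κ : Type} [LT κ] [DecidableLT κ] (xs : List α) (x : α) (key : α → κ) :
    PySem.List.sorted (xs ++ [x]) key false
      = PySem.List.insertBy (fun a b => decide (key a < key b)) x (PySem.List.sorted xs key false) := by
  rw [PySem.List.sorted_eq_foldl_insertBy, PySem.List.sorted_eq_foldl_insertBy, List.foldl_append]
  rfl

-- the sorted distinct keys are strictly increasing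
lemma sorted_keys_strict (K : List Int) (hK : K.Nodup) :
    (PySem.List.sorted K (fun x => x) false).Pairwise (· < ·) := by
  have h1 : (PySem.List.sorted K (fun x => x) false).Pairwise (· ≤ ·) :=
    PySem.List.sorted_pairwise K (fun x => x)
  have h2 : (PySem.List.sorted K (fun x => x) false).Nodup :=
    (PySem.List.sorted_perm K (fun x => x) false).nodup_iff.mpr hK
  exact (h1.and h2).imp (fun h => lt_of_le_of_ne h.1 h.2)

-- the key-set of ws (found indices, first-found order)
def pvKeySet (f : String → Int) (ws : List String) : List Int :=
  PySem.Set.ofList ((ws.filter (fun w => !decide (f w = -1))).map f)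

lemma mem_pvKeySet (f : String → Int) (ws : List String) (i : Int) :
    i ∈ pvKeySet f ws ↔ (∃ w ∈ ws, f w = i) ∧ i ≠ -1 := by
  unfold pvKeySet
  rw [PySem.Set.mem_ofList]
  simp only [List.mem_map, List.mem_filter]
  constructor
  · rintro ⟨w, ⟨hw, hf⟩, rfl⟩
    exact ⟨⟨w, hw, rfl⟩, by simpa using hf⟩
  · rintro ⟨⟨w, hw, rfl⟩, hne⟩
    exact ⟨w, ⟨hw, by simpa using hne⟩, rfl⟩

-- THE CORE: a stable sort on first-appearance keys is the concatenation of the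
-- per-index buckets in increasing index order, with the never-found words last.
lemma core (f : String → Int) (ws : List String) :
    @PySem.List.sorted String (WithTop Int) _ WithTop.decidableLT ws (pvKey f) false
      = (PySem.List.sorted (pvKeySet f ws) (fun x => x) false).flatMap
          (fun i => ws.filter (fun w => decide (f w = i)))
        ++ ws.filter (fun w => decide (f w = -1)) := by
  induction ws using List.reverseRecOn with
  | nil => simp [pvKeySet, PySem.List.sorted]
  | append_singleton ws w ih =>
    rw [sorted_append_singleton, ih]
    have hkey_bucket : ∀ i, i ≠ -1 → ∀ y ∈ ws.filter (fun w => decide (f w = i)),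
        pvKey f y = (i : WithTop Int) := by
      intro i hi y hy
      have := (List.mem_filter.mp hy).2
      have hfy : f y = i := by simpa using this
      simp [pvKey, hfy, hi]
    by_cases hw : f w = -1
    · -- w never found: key set and buckets unchanged, w goes to the end of missing
      have hKeq : pvKeySet f (ws ++ [w]) = pvKeySet f ws := by
        unfold pvKeySet
        rw [List.filter_append]
        simp [hw]
      have hbeq : ∀ i ∈ PySem.List.sorted (pvKeySet f ws) (fun x => x) false,
          (ws ++ [w]).filter (fun v => decide (f v = i)) = ws.filter (fun v => decide (f v = i)) := by
        intro i hi
        have hne : i ≠ -1 := ((mem_pvKeySet f ws i).mp ((PySem.List.mem_sorted _ _ _ i).mp hi)).2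
        rw [List.filter_append]
        have : ¬ (f w = i) := by rw [hw]; exact fun h => hne h.symm
        simp [this]
      rw [hKeq]
      rw [List.flatMap_congr (fun a ha => hbeq a ha)]
      rw [List.filter_append]
      simp only [List.filter_cons, List.filter_nil, hw, decide_true, if_true]
      rw [PySem.List.insertBy_of_forall_not_before]
      · simp
      · intro y _
        simp only [pvKey, hw, ite_true]
        simp [not_top_lt]
    · -- w found at index f w
      have hmiss : (ws ++ [w]).filter (fun v => decide (f v = -1))
          = ws.filter (fun v => decide (f v = -1)) := by
        rw [List.filter_append]; simp [hw]
      have hKeq : pvKeySet f (ws ++ [w]) = PySem.Set.add (pvKeySet f ws) (f w) := by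
        unfold pvKeySet
        rw [List.filter_append]
        simp only [List.filter_cons, List.filter_nil, hw, decide_false, Bool.not_false, if_true]
        rw [List.map_append]
        simp only [List.map_cons, List.map_nil]
        exact PySem.Set.ofList_append_singleton _ _
      have hKnodup : (pvKeySet f ws).Nodup := PySem.Set.nodup_ofList _
      have hSstrict : (PySem.List.sorted (pvKeySet f ws) (fun x => x) false).Pairwise (· < ·) :=
        sorted_keys_strict _ hKnodup
      have hSmem : ∀ j ∈ PySem.List.sorted (pvKeySet f ws) (fun x => x) false, j ∈ pvKeySet f ws := by
        intro j hj; exact (PySem.List.mem_sorted _ _ _ j).mp hj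
      have hkw : pvKey f w = ((f w : Int) : WithTop Int) := by simp [pvKey, hw]
      have hbucket_new : ∀ j, (ws ++ [w]).filter (fun v => decide (f v = j))
          = ws.filter (fun v => decide (f v = j)) ++ (if j = f w then [w] else []) := by
        intro j
        rw [List.filter_append]
        by_cases hji : j = f w
        · subst hji; simp
        · have : ¬ (f w = j) := fun h => hji h.symm
          simp [this, hji]
      by_cases hiK : f w ∈ pvKeySet f ws
      · -- existing bucket grows at the end
        have hKsame : pvKeySet f (ws ++ [w]) = pvKeySet f ws := by
          rw [hKeq, PySem.Set.add_of_mem hiK]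
        have hiS : f w ∈ PySem.List.sorted (pvKeySet f ws) (fun x => x) false :=
          (PySem.List.mem_sorted _ _ _ _).mpr hiK
        obtain ⟨L, R, hsplit, hLlt, hRgt⟩ := strict_split _ (f w) hSstrict hiS
        rw [hKsame, hsplit, hmiss]
        rw [List.flatMap_append, List.flatMap_cons, List.flatMap_append, List.flatMap_cons]
        have hLsame : L.flatMap (fun j => (ws ++ [w]).filter (fun v => decide (f v = j)))
            = L.flatMap (fun j => ws.filter (fun v => decide (f v = j))) :=
          List.flatMap_congr (fun j hj => by
            rw [hbucket_new j, if_neg (ne_of_lt (hLlt j hj))]; simp)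
        have hRsame : R.flatMap (fun j => (ws ++ [w]).filter (fun v => decide (f v = j)))
            = R.flatMap (fun j => ws.filter (fun v => decide (f v = j))) :=
          List.flatMap_congr (fun j hj => by
            rw [hbucket_new j, if_neg (ne_of_gt (hRgt j hj))]; simp)
        rw [hLsame, hRsame, hbucket_new (f w), if_pos rfl]
        simp only [List.append_assoc, List.singleton_append]
        apply insertBy_step4
        · intro y hy
          obtain ⟨j, hj, hyj⟩ := List.mem_flatMap.mp hy
          have hjne : j ≠ -1 := ((mem_pvKeySet f ws j).mp
            (hSmem j (by rw [hsplit]; exact List.mem_append.mpr (Or.inl hj)))).2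
          rw [hkey_bucket j hjne y hyj, hkw]
          simp only [decide_eq_false_iff_not]
          exact not_lt.mpr (WithTop.coe_le_coe.mpr (le_of_lt (hLlt j hj)))
        · intro y hy
          rw [hkey_bucket (f w) hw y hy, hkw]
          simp only [decide_eq_false_iff_not]
          exact lt_irrefl _
        · intro y hy
          obtain ⟨j, hj, hyj⟩ := List.mem_flatMap.mp hy
          have hjne : j ≠ -1 := ((mem_pvKeySet f ws j).mp
            (hSmem j (by rw [hsplit]; exact List.mem_append.mpr (Or.inr (List.mem_cons.mpr (Or.inr hj)))))).2
          rw [hkey_bucket j hjne y hyj, hkw]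
          simp only [decide_eq_true_eq]
          exact WithTop.coe_lt_coe.mpr (hRgt j hj)
        · intro y hy
          have hy2 : f y = -1 := by simpa using (List.mem_filter.mp hy).2
          rw [hkw]
          simp only [pvKey, hy2, ite_true, decide_eq_true_eq]
          exact WithTop.coe_lt_top (f w)
      · -- fresh key: f w enters the key set, with a one-element bucket
        have hKnew : pvKeySet f (ws ++ [w]) = pvKeySet f ws ++ [f w] := by
          rw [hKeq, PySem.Set.add_of_not_mem hiK]
        have hiS : f w ∉ PySem.List.sorted (pvKeySet f ws) (fun x => x) false :=
          fun h => hiK (hSmem _ h)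
        obtain ⟨L, R, hLR, hins, hLlt, hRgt⟩ := insert_strict
          (fun a b => decide ((fun x : Int => x) a < (fun x : Int => x) b))
          (by intro a c; simp) _ (f w) hSstrict hiS
        have hSnew : PySem.List.sorted (pvKeySet f (ws ++ [w])) (fun x => x) false = L ++ f w :: R := by
          rw [hKnew, sorted_append_singleton, hins]
        have hbi_empty : ws.filter (fun v => decide (f v = f w)) = [] := by
          rw [List.filter_eq_nil_iff]
          intro v hv
          simp only [decide_eq_true_eq]
          intro hc
          exact hiK ((mem_pvKeySet f ws (f w)).mpr ⟨⟨v, hv, hc⟩, hw⟩)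
        rw [hSnew, hmiss]
        rw [List.flatMap_append, List.flatMap_cons]
        have hLsame : L.flatMap (fun j => (ws ++ [w]).filter (fun v => decide (f v = j)))
            = L.flatMap (fun j => ws.filter (fun v => decide (f v = j))) :=
          List.flatMap_congr (fun j hj => by
            rw [hbucket_new j, if_neg (ne_of_lt (hLlt j hj))]; simp)
        have hRsame : R.flatMap (fun j => (ws ++ [w]).filter (fun v => decide (f v = j)))
            = R.flatMap (fun j => ws.filter (fun v => decide (f v = j))) :=
          List.flatMap_congr (fun j hj => by
            rw [hbucket_new j, if_neg (ne_of_gt (hRgt j hj))]; simp)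
        rw [hLsame, hRsame, hbucket_new (f w), if_pos rfl, hbi_empty]
        rw [hLR, List.flatMap_append]
        simp only [List.append_assoc, List.nil_append, List.singleton_append]
        apply insertBy_step3
        · intro y hy
          obtain ⟨j, hj, hyj⟩ := List.mem_flatMap.mp hy
          have hjne : j ≠ -1 := ((mem_pvKeySet f ws j).mp
            (hSmem j (by rw [hLR]; exact List.mem_append.mpr (Or.inl hj)))).2
          rw [hkey_bucket j hjne y hyj, hkw]
          simp only [decide_eq_false_iff_not]
          exact not_lt.mpr (WithTop.coe_le_coe.mpr (le_of_lt (hLlt j hj)))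
        · intro y hy
          obtain ⟨j, hj, hyj⟩ := List.mem_flatMap.mp hy
          have hjne : j ≠ -1 := ((mem_pvKeySet f ws j).mp
            (hSmem j (by rw [hLR]; exact List.mem_append.mpr (Or.inr hj)))).2
          rw [hkey_bucket j hjne y hyj, hkw]
          simp only [decide_eq_true_eq]
          exact WithTop.coe_lt_coe.mpr (hRgt j hj)
        · intro y hy
          have hy2 : f y = -1 := by simpa using (List.mem_filter.mp hy).2
          rw [hkw]
          simp only [pvKey, hy2, ite_true, decide_eq_true_eq]
          exact WithTop.coe_lt_top (f w)

-- B's loop state: bucket dict (characterised below) and the missing words in order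
lemma alt_state (f : String → Int) (ws : List String) :
    ws.foldl (fun (st : PySem.Dict Int (List String) × List String) w =>
        if f w = -1 then (st.1, st.2 ++ [w])
        else (st.1.modify (f w) [] (fun b => b ++ [w]), st.2)) (PySem.Dict.empty, [])
      = ((ws.filter (fun w => !decide (f w = -1))).foldl
          (fun d w => d.modify (f w) [] (fun b => b ++ [w])) PySem.Dict.empty,
         ws.filter (fun w => decide (f w = -1))) := by
  induction ws using List.reverseRecOn with
  | nil => simp
  | append_singleton ws w ih =>
    rw [List.foldl_append, ih, List.foldl_cons, List.foldl_nil]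
    by_cases hw : f w = -1
    · simp [hw, List.filter_append]
    · simp [hw, List.filter_append]

lemma alt_bucket (f : String → Int) (ws : List String) (i : Int) :
    ((ws.filter (fun w => !decide (f w = -1))).foldl
        (fun d w => d.modify (f w) [] (fun b => b ++ [w])) PySem.Dict.empty).getD i []
      = (ws.filter (fun w => !decide (f w = -1))).filter (fun w => decide (f w = i)) := by
  have h1 : (ws.filter (fun w => !decide (f w = -1))).foldl
        (fun d w => d.modify (f w) [] (fun b => b ++ [w])) PySem.Dict.empty
      = ((ws.filter (fun w => !decide (f w = -1))).map (fun w => (f w, w))).foldl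
        (fun d p => d.modify p.1 [] (fun b => b ++ [p.2])) PySem.Dict.empty := by
    rw [List.foldl_map]
  rw [h1, PySem.Dict.getD_foldl_modify_append, PySem.Dict.getD_empty]
  rw [List.filter_map]
  have hp : ((fun p : Int × String => p.1 == i) ∘ fun w => (f w, w)) = fun w => decide (f w = i) := by
    funext w; exact Bool.beq_eq_decide_eq (f w) i
  rw [hp]
  have hm : ((fun p : Int × String => p.2) ∘ fun w => (f w, w)) = id := by
    funext w; rfl
  rw [List.map_map, hm, List.map_id, List.nil_append]

lemma alt_keys (f : String → Int) (ws : List String) :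
    ((ws.filter (fun w => !decide (f w = -1))).foldl
        (fun d w => d.modify (f w) [] (fun b => b ++ [w])) PySem.Dict.empty).keys
      = pvKeySet f ws := by
  rw [PySem.Dict.keys_foldl_modify_key _ f [] (fun _ w => fun b => b ++ [w])]
  rw [PySem.Dict.keys_empty, PySem.Set.update_nil_left]
  rfl

-- ===== VERDICT (by name: the statement is the Claim_ definition above) =====
theorem sort_words_by_first_appearance_spec : Claim_equal_sort_words_by_first_appearance := by
  unfold Claim_equal_sort_words_by_first_appearance
  intro words string _
  unfold Spec_sort_words_by_first_appearance
  unfold sort_words_by_first_appearance sort_words_by_first_appearance_alt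
  simp only []
  -- B's side: loop state, keys, and the output fold
  rw [alt_state (fun w => PySem.Str.find string w) words]
  simp only []
  rw [alt_keys (fun w => PySem.Str.find string w) words]
  rw [PySem.List.foldl_append_eq_flatMap, List.nil_append]
  -- A's side: replace the dict-lookup key by pvKey using sorted_congr + dict_get
  have hA : (@PySem.List.sorted String (WithTop Int) _ WithTop.decidableLT words (fun x =>
        match (words.foldl (fun d word =>
          if PySem.Str.find string word ≠ -1 then d.insert word (PySem.Str.find string word) else d)
          (PySem.Dict.empty : PySem.Dict String Int)).get? x with
        | some i => ((i : Int) : WithTop Int)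
        | none => (⊤ : WithTop Int)) false)
      = @PySem.List.sorted String (WithTop Int) _ WithTop.decidableLT words
          (pvKey (fun w => PySem.Str.find string w)) false := by
    apply sorted_congr
    intro x hx
    rw [dict_get (fun w => PySem.Str.find string w) words PySem.Dict.empty x]
    by_cases hfx : PySem.Chars.find string.toList x.toList = -1
    · simp [hfx, pvKey, PySem.Str.find]
    · simp [hfx, hx, pvKey, PySem.Str.find]
  rw [hA, core (fun w => PySem.Str.find string w) words]
  congr 1
  apply List.flatMap_congr
  intro i hi
  rw [alt_bucket (fun w => PySem.Str.find string w) words i]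
  have hine : i ≠ -1 := ((mem_pvKeySet (fun w => PySem.Str.find string w) words i).mp
    ((PySem.List.mem_sorted _ _ _ i).mp hi)).2
  rw [List.filter_filter]
  apply List.filter_congr
  intro x _
  by_cases hfx : PySem.Chars.find string.toList x.toList = i
  · simp [PySem.Str.find, hfx]
    intro h2
    exact hine (hfx ▸ h2)
  · simp [PySem.Str.find, hfx]
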